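-- pv_equiv track=rewrite | github.com/ZnnnnnH2/Python-design-and-ai-learning | midterm_test_3/i.py | reverse_even_characters
-- ===== SOURCE A (Python) =====
-- def reverse_even_characters(string):
-- 	string = " "+string
-- 	ls = []
-- 	l = 1
-- 	r = len(string)-1
-- 	if r%2 == 1:
-- 		r -= 1
-- 	length = len(string)
-- 	while l<length and r>=1:
-- 		ls.append(string[l])
-- 		ls.append(string[r])
-- 		r -= 2
-- 		l+=2
-- 	if l<length:
-- 		ls.append(string[l])
-- 	return ''.join(ls)
-- ===== SOURCE B (Python) =====
-- def reverse_even_characters(string):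
-- 	evens, odds = [], []
-- 	for i, ch in enumerate(string):
-- 		if i % 2 == 0:
-- 			evens.append(ch)
-- 		else:
-- 			odds.append(ch)
-- 	out = [c for pair in zip(evens, reversed(odds)) for c in pair]
-- 	out.extend(evens[len(odds):])
-- 	return ''.join(out)
-- ===== Notes on version B (the rewrite author's own statement) =====
-- stated objective: simpler
-- what changed: A walks a space-padded copy with two converging index pointers and manual parity fixing of the right pointer; B splits the string into even- and odd-position characters in one pass, zips the evens with the reversed odds, and appends the leftover even character.
import Mathlib
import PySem

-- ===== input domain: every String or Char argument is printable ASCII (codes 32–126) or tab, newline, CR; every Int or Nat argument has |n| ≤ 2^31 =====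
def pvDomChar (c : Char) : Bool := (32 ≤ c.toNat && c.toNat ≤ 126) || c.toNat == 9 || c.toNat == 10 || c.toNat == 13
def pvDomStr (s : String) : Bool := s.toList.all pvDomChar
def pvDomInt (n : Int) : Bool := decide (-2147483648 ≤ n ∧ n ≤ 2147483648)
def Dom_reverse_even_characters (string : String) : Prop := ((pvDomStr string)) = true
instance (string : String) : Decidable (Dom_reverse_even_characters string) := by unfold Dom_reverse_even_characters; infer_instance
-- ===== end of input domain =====

-- B replaces A's converging two-pointer walk over a space-padded copy by a parity split
-- (one pass) followed by a zip of evens with reversed odds plus the leftover slice (objective: simpler).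

-- ===== PORT A =====
-- A's while loop; string indexing is always in range here, so pyGetD's default is never used.
def pvALoop (p : List Char) (l r : Int) (ls : List Char) : List Char :=
  if l < (p.length : Int) ∧ 1 ≤ r then
    pvALoop p (l + 2) (r - 2) (ls ++ [PySem.List.pyGetD p l ' ', PySem.List.pyGetD p r ' '])
  else if l < (p.length : Int) then ls ++ [PySem.List.pyGetD p l ' '] else ls
termination_by ((p.length : Int) - l).toNat
decreasing_by omega

def reverse_even_characters (string : String) : String :=
  let p : List Char := ' ' :: string.toList        -- string = " " + string
  let r0 : Int := (p.length : Int) - 1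
  let r : Int := if r0 % 2 == 1 then r0 - 1 else r0
  String.ofList (pvALoop p 1 r [])

-- ===== PORT B =====
def reverse_even_characters_alt (string : String) : String :=
  let eo := (PySem.List.enumerate string.toList 0).foldl
      (fun (acc : List Char × List Char) (q : Int × Char) =>
        if q.1 % 2 == 0 then (acc.1 ++ [q.2], acc.2) else (acc.1, acc.2 ++ [q.2]))
      ([], [])
  let out := (eo.1.zip eo.2.reverse).flatMap (fun q => [q.1, q.2])
  let out := out ++ PySem.List.slice eo.1 (some ((eo.2.length : Nat) : Int)) none
  String.ofList out

-- ===== PRECONDITION & SPEC =====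
def Spec_reverse_even_characters (string : String) (out : String) : Prop := out = reverse_even_characters_alt string
instance (string : String) (out : String) : Decidable (Spec_reverse_even_characters string out) := by unfold Spec_reverse_even_characters; infer_instance

-- ===== CLAIM (what is proved, stated in full; the proofs are below) =====
def Claim_equal_reverse_even_characters : Prop := ∀ (string : String), Dom_reverse_even_characters string → Spec_reverse_even_characters string (reverse_even_characters string)

-- ===== LEMMAS AND PROOFS =====

-- elements at even positions
def everyOther : List Char → List Char
  | [] => []
  | [c] => [c]
  | c :: _ :: cs => c :: everyOther cs

-- interleave, keeping one leftover head when the second list runs out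
def ilv : List Char → List Char → List Char
  | [], _ => []
  | x :: _, [] => [x]
  | x :: xs, y :: ys => x :: y :: ilv xs ys

theorem everyOther_length (t : List Char) : (everyOther t).length = (t.length + 1) / 2 := by
  induction t using everyOther.induct with
  | case1 => simp [everyOther]
  | case2 c => simp [everyOther]
  | case3 c c2 cs ih => simp [everyOther, ih]; omega

theorem everyOther_tail_length (t : List Char) : (everyOther t.tail).length = t.length / 2 := by
  cases t with
  | nil => simp [everyOther]
  | cons c cs => simp only [List.tail_cons, everyOther_length, List.length_cons]

theorem everyOther_getD (t : List Char) (k : Nat) (d : Char) :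
    (everyOther t).getD k d = t.getD (2 * k) d := by
  induction t using everyOther.induct generalizing k with
  | case1 => simp [everyOther]
  | case2 c =>
      cases k with
      | zero => simp [everyOther]
      | succ k => simp [everyOther, List.getD]
  | case3 c c2 cs ih =>
      cases k with
      | zero => simp [everyOther]
      | succ k =>
          have h2 : 2 * (k + 1) = (2 * k) + 1 + 1 := by omega
          simp only [everyOther, h2, List.getD_cons_succ]
          simpa [List.getD] using ih k

theorem everyOther_tail_getD (t : List Char) (k : Nat) (d : Char) :
    (everyOther t.tail).getD k d = t.getD (2 * k + 1) d := by
  cases t with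
  | nil => simp [everyOther]
  | cons c cs => simpa using everyOther_getD cs k d

theorem everyOther_cons (c : Char) (cs : List Char) :
    everyOther (c :: cs) = c :: everyOther cs.tail := by
  cases cs <;> simp [everyOther]

-- the parity-splitting fold of B
theorem split_fold (t : List Char) : ∀ (s : Int) (e o : List Char),
    (PySem.List.enumerate t s).foldl
      (fun (acc : List Char × List Char) (q : Int × Char) =>
        if q.1 % 2 == 0 then (acc.1 ++ [q.2], acc.2) else (acc.1, acc.2 ++ [q.2]))
      (e, o)
    = if s % 2 == 0 then (e ++ everyOther t, o ++ everyOther t.tail)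
      else (e ++ everyOther t.tail, o ++ everyOther t) := by
  induction t with
  | nil => intro s e o; cases h : (s % 2 == 0) <;> simp [PySem.List.enumerate_nil, everyOther]
  | cons c cs ih =>
      intro s e o
      rw [PySem.List.enumerate_cons, List.foldl_cons]
      have hmod : (s + 1) % 2 = (s % 2 + 1) % 2 := by omega
      rcases Int.emod_two_eq_zero_or_one s with h | h
      · have h1 : (s + 1) % 2 = 1 := by omega
        simp only [h, h1, ih]
        simp [everyOther_cons]
      · have h1 : (s + 1) % 2 = 0 := by omega
        simp only [h, h1, ih]
        simp [everyOther_cons]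

-- zip-interleave plus leftover equals ilv when lengths differ by at most one
theorem zip_ilv : ∀ (xs ys : List Char), ys.length ≤ xs.length → xs.length ≤ ys.length + 1 →
    (xs.zip ys).flatMap (fun q => [q.1, q.2]) ++ xs.drop ys.length = ilv xs ys := by
  intro xs
  induction xs with
  | nil =>
      intro ys h1 h2
      cases ys with
      | nil => simp [ilv]
      | cons y ys => simp at h1
  | cons x xs ih =>
      intro ys h1 h2
      cases ys with
      | nil =>
          cases xs with
          | nil => simp [ilv]
          | cons a b => simp at h2
      | cons y ys =>
          simp only [List.zip_cons_cons, List.flatMap_cons, List.length_cons, List.drop_succ_cons]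
          have := ih ys (by simpa using h1) (by simpa using h2)
          simp [ilv, ← this]

theorem getD_reverse (l : List Char) (k : Nat) (d : Char) (h : k < l.length) :
    l.reverse.getD k d = l.getD (l.length - 1 - k) d := by
  have h1 : k < l.reverse.length := by simpa using h
  have h2 : l.length - 1 - k < l.length := by omega
  rw [List.getD_eq_getElem _ _ h1, List.getD_eq_getElem _ _ h2, List.getElem_reverse]

theorem drop_singleton (l : List Char) (k : Nat) (h : l.length = k + 1) (d : Char) :
    l.drop k = [l.getD k d] := by
  have hk : k < l.length := by omega
  rw [List.drop_eq_getElem_cons hk, List.getD_eq_getElem _ _ hk,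
      List.drop_eq_nil_of_le (by omega)]

theorem drop_cons_getD (l : List Char) (k : Nat) (h : k < l.length) (d : Char) :
    l.drop k = l.getD k d :: l.drop (k + 1) := by
  rw [List.drop_eq_getElem_cons h, List.getD_eq_getElem _ _ h]

-- A's loop computes the interleave of the splits
theorem aLoop_eq (t : List Char) : ∀ (m k : Nat) (acc : List Char),
    k + m = (everyOther t.tail).length →
    pvALoop (' ' :: t) ((2 * k + 1 : Nat) : Int) ((2 * m : Nat) : Int) acc
      = acc ++ ilv ((everyOther t).drop k) ((everyOther t.tail).reverse.drop k) := by
  intro m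
  induction m with
  | zero =>
      intro k acc hk
      rw [pvALoop]
      have hO : (everyOther t.tail).length = t.length / 2 := everyOther_tail_length t
      have hE : (everyOther t).length = (t.length + 1) / 2 := everyOther_length t
      have hdropO : (everyOther t.tail).reverse.drop k = [] :=
        List.drop_eq_nil_of_le (by simp; omega)
      by_cases hlt : ((2 * k + 1 : Nat) : Int) < ((' ' :: t).length : Int)
      · have hklen : 2 * k < t.length := by push_cast [List.length_cons] at hlt; omega
        have hkk : k = t.length / 2 := by omega
        have hEk : (everyOther t).length = k + 1 := by rw [hE, hkk]; omega
        rw [if_neg (by rintro ⟨-, hx⟩; omega), if_pos hlt]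
        rw [drop_singleton (everyOther t) k hEk ' ', hdropO]
        have : PySem.List.pyGetD (' ' :: t) ((2 * k + 1 : Nat) : Int) ' '
            = (everyOther t).getD k ' ' := by
          rw [PySem.List.pyGetD_natCast, everyOther_getD]
          simp [List.getD]
        rw [this]; rfl
      · have hklen : ¬ (2 * k < t.length) := by push_cast [List.length_cons] at hlt; omega
        have hEk : (everyOther t).drop k = [] := List.drop_eq_nil_of_le (by omega)
        rw [if_neg (by rintro ⟨-, hx⟩; omega), if_neg hlt, hEk, hdropO]
        simp [ilv]
  | succ m ih =>
      intro k acc hk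
      have hO : (everyOther t.tail).length = t.length / 2 := everyOther_tail_length t
      have hE : (everyOther t).length = (t.length + 1) / 2 := everyOther_length t
      rw [pvALoop]
      rw [if_pos (by refine ⟨?_, ?_⟩ <;> (push_cast [List.length_cons]; omega))]
      have e1 : ((2 * k + 1 : Nat) : Int) + 2 = ((2 * (k + 1) + 1 : Nat) : Int) := by push_cast; omega
      have e2 : ((2 * (m + 1) : Nat) : Int) - 2 = ((2 * m : Nat) : Int) := by push_cast; omega
      rw [e1, e2, ih (k + 1) _ (by omega)]
      have hkE : k < (everyOther t).length := by omega
      have hkO : k < (everyOther t.tail).length := by omega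
      have hvl : PySem.List.pyGetD (' ' :: t) ((2 * k + 1 : Nat) : Int) ' '
          = (everyOther t).getD k ' ' := by
        rw [PySem.List.pyGetD_natCast, everyOther_getD]; simp [List.getD]
      have hvr : PySem.List.pyGetD (' ' :: t) ((2 * (m + 1) : Nat) : Int) ' '
          = (everyOther t.tail).reverse.getD k ' ' := by
        rw [PySem.List.pyGetD_natCast, getD_reverse _ _ _ (by simpa using hkO),
            everyOther_tail_getD]
        have : 2 * ((everyOther t.tail).length - 1 - k) + 1 = 2 * (m + 1) - 1 := by omega
        rw [this]
        have h1 : 2 * (m + 1) = (2 * (m + 1) - 1) + 1 := by omega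
        rw [h1]; simp [List.getD]
      rw [hvl, hvr,
          drop_cons_getD (everyOther t) k hkE ' ',
          drop_cons_getD (everyOther t.tail).reverse k (by simpa using hkO) ' ']
      simp [ilv]

-- ===== VERDICT (by name: the statement is the Claim_ definition above) =====
theorem reverse_even_characters_spec : Claim_equal_reverse_even_characters := by
  intro s _
  unfold Spec_reverse_even_characters reverse_even_characters reverse_even_characters_alt
  set t := s.toList with ht
  have hO : (everyOther t.tail).length = t.length / 2 := everyOther_tail_length t
  have hE : (everyOther t).length = (t.length + 1) / 2 := everyOther_length t
  -- B side
  rw [split_fold t 0 [] []]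
  simp only [show ((0 : Int) % 2 == 0) = true from rfl, if_pos, List.nil_append]
  rw [PySem.List.slice_from_natCast]
  have hz := zip_ilv (everyOther t) (everyOther t.tail).reverse (by simp; omega) (by simp; omega)
  simp only [List.length_reverse] at hz
  rw [hz]
  -- A side
  have hr : (if ((((' ' :: t).length : Int) - 1) % 2 == 1)
        then (((' ' :: t).length : Int) - 1) - 1 else (((' ' :: t).length : Int) - 1))
      = ((2 * ((everyOther t.tail).length) : Nat) : Int) := by
    simp only [List.length_cons]
    rcases Nat.even_or_odd t.length with ⟨j, hj⟩ | ⟨j, hj⟩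
    · rw [if_neg (by simp; omega)]; push_cast; omega
    · rw [if_pos (by simp; omega)]; push_cast; omega
  rw [hr]
  have h1 : (1 : Int) = ((2 * 0 + 1 : Nat) : Int) := by norm_num
  rw [h1, aLoop_eq t ((everyOther t.tail).length) 0 [] (by omega)]
  simp
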